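-- pv_equiv track=rewrite | github.com/demorsy/connect-four-ai | main.py | count_block_moves
-- ===== SOURCE A (Python) =====
-- def count_block_moves(board, player):
--     count = 0
--     for row in range(len(board) - 3):
--         for col in range(len(board[0])):
--             if board[row][col] == 0 and board[row+1][col] == player and board[row+2][col] == player and board[row+3][col] == player:
--                 count += 1
--     for row in range(len(board)):
--         for col in range(len(board[0]) - 3):
--             if board[row][col] == 0 and board[row][col+1] == player and board[row][col+2] == player and board[row][col+3] == player:
--                 count += 1
--     for row in range(len(board) - 3):
--         for col in range(len(board[0]) - 3):
--             if board[row][col] == 0 and board[row+1][col+1] == player and board[row+2][col+2] == player and board[row+3][col+3] == player: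
--                 count += 1
--     for row in range(len(board) - 3):
--         for col in range(3, len(board[0])):
--             if board[row][col] == 0 and board[row+1][col-1] == player and board[row+2][col-2] == player and board[row+3][col-3] == player:
--                 count += 1
--     return count
-- ===== SOURCE B (Python) =====
-- def count_block_moves(board, player):
--     width = len(board[0]) if board else 0
--     players = set()
--     zeros = set()
--     for r, row in enumerate(board):
--         for c, v in enumerate(row[:width]):
--             if v == player:
--                 players.add((r, c))
--             if v == 0:
--                 zeros.add((r, c))
--     count = 0
--     for (r, c) in players:
--         for dr, dc in ((1, 0), (0, 1), (1, 1), (1, -1)):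
--             if ((r + dr, c + dc) in players
--                     and (r + 2 * dr, c + 2 * dc) in players
--                     and (r - dr, c - dc) in zeros):
--                 count += 1
--     return count
-- ===== Notes on version B (the rewrite author's own statement) =====
-- stated objective: alternative
-- what changed: Replaces A's four dense per-direction grid scans by a sparse set-indexed algorithm: one pass collects the player's cells and the empty cells into two sets, then only the player's cells are enumerated, counting those that start a forward 3-run of player cells whose backward neighbour is an empty cell.
-- outside the precondition, e.g. on count_block_moves([[0, 1, 1, 1], [5]], 1): A returns 1, B returns 1
import Mathlib
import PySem

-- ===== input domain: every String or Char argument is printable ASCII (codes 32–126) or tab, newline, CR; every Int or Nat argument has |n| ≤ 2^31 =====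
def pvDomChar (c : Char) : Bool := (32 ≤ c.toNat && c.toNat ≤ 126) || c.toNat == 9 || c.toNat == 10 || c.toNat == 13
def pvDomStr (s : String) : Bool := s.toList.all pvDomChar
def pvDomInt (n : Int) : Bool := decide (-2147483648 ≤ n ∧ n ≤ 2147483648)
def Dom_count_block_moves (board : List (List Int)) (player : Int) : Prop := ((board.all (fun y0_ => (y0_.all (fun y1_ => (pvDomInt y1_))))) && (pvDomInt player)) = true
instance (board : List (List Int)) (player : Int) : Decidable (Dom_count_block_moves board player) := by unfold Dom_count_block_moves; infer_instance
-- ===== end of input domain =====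

-- B replaces A's four per-direction grid scans by a sparse, set-indexed algorithm:
-- it collects the player's cells and the empty cells into two hash sets once, then
-- counts, over the player cells only, those that START a 3-run whose backward
-- neighbour is an empty cell (objective: alternative; same asymptotic cost).

-- ===== PORT A =====
-- board[r][c]; total with default 0 — Pre_ guarantees every access Python performs is in range
def pvCellA (board : List (List Int)) (r c : Int) : Int :=
  PySem.List.pyGetD (PySem.List.pyGetD board r []) c 0

def count_block_moves (board : List (List Int)) (player : Int) : Int :=
  let h : Int := PySem.List.len board
  let w : Int := PySem.List.len (PySem.List.pyGetD board 0 [])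
  let c1 := (PySem.List.pyRange 0 (h - 3) 1).foldl (fun cnt row =>
      (PySem.List.pyRange 0 w 1).foldl (fun cnt col =>
        if pvCellA board row col = 0 ∧ pvCellA board (row+1) col = player ∧
           pvCellA board (row+2) col = player ∧ pvCellA board (row+3) col = player
        then cnt + 1 else cnt) cnt) 0
  let c2 := (PySem.List.pyRange 0 h 1).foldl (fun cnt row =>
      (PySem.List.pyRange 0 (w - 3) 1).foldl (fun cnt col =>
        if pvCellA board row col = 0 ∧ pvCellA board row (col+1) = player ∧
           pvCellA board row (col+2) = player ∧ pvCellA board row (col+3) = player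
        then cnt + 1 else cnt) cnt) c1
  let c3 := (PySem.List.pyRange 0 (h - 3) 1).foldl (fun cnt row =>
      (PySem.List.pyRange 0 (w - 3) 1).foldl (fun cnt col =>
        if pvCellA board row col = 0 ∧ pvCellA board (row+1) (col+1) = player ∧
           pvCellA board (row+2) (col+2) = player ∧ pvCellA board (row+3) (col+3) = player
        then cnt + 1 else cnt) cnt) c2
  let c4 := (PySem.List.pyRange 0 (h - 3) 1).foldl (fun cnt row =>
      (PySem.List.pyRange 3 w 1).foldl (fun cnt col =>
        if pvCellA board row col = 0 ∧ pvCellA board (row+1) (col-1) = player ∧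
           pvCellA board (row+2) (col-2) = player ∧ pvCellA board (row+3) (col-3) = player
        then cnt + 1 else cnt) cnt) c3
  c4

-- ===== PORT B =====
def pvDirs : List (Int × Int) := [(1, 0), (0, 1), (1, 1), (1, -1)]

-- body of the set-building loop: 'if v == player: players.add((r,c)); if v == 0: zeros.add((r,c))'
def pvAddCell (player : Int)
    (st : PySem.Set (Int × Int) × PySem.Set (Int × Int)) (r : Int) (cv : Int × Int) :
    PySem.Set (Int × Int) × PySem.Set (Int × Int) :=
  let st1 := if cv.2 = player then (PySem.Set.add st.1 (r, cv.1), st.2) else st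
  if cv.2 = 0 then (st1.1, PySem.Set.add st1.2 (r, cv.1)) else st1

-- 'for r, row in enumerate(board): for c, v in enumerate(row[:width]): …'
def pvBuildSets (board : List (List Int)) (player w : Int) :
    PySem.Set (Int × Int) × PySem.Set (Int × Int) :=
  (PySem.List.enumerate board 0).foldl (fun st rr =>
    (PySem.List.enumerate (PySem.List.slice rr.2 none (some w)) 0).foldl
      (fun st cv => pvAddCell player st rr.1 cv) st)
    (PySem.Set.empty, PySem.Set.empty)

-- 'len(board[0]) if board else 0'
def pvW (board : List (List Int)) : Int :=
  match board with | [] => 0 | r :: _ => PySem.List.len r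

def count_block_moves_alt (board : List (List Int)) (player : Int) : Int :=
  let sets := pvBuildSets board player (pvW board)
  let players := sets.1
  let zeros := sets.2
  players.foldl (fun cnt p =>
    pvDirs.foldl (fun cnt d =>
      if (p.1 + d.1, p.2 + d.2) ∈ players ∧
         (p.1 + 2 * d.1, p.2 + 2 * d.2) ∈ players ∧
         (p.1 - d.1, p.2 - d.2) ∈ zeros
      then cnt + 1 else cnt) cnt) 0

-- ===== PRECONDITION & SPEC =====
-- Pre_ excludes boards in which some row is shorter than the first row (unless the whole
-- board is smaller than 4x4, where A reads no cell): there A's indexing against the first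
-- row's width can raise IndexError.
def Pre_count_block_moves (board : List (List Int)) (player : Int) : Prop :=
  (∀ row ∈ board, (board.headD []).length ≤ row.length) ∨
  (board.length < 4 ∧ (board.headD []).length < 4)
instance (board : List (List Int)) (player : Int) : Decidable (Pre_count_block_moves board player) := by unfold Pre_count_block_moves; infer_instance

def pvWitness_count_block_moves : List (List Int) × Int := ([[0, 0, 0], [1, 1, 1], [1, 0, 1], [1, 1, 0]], 1)

def Spec_count_block_moves (board : List (List Int)) (player : Int) (out : Int) : Prop := out = count_block_moves_alt board player
instance (board : List (List Int)) (player : Int) (out : Int) : Decidable (Spec_count_block_moves board player out) := by unfold Spec_count_block_moves; infer_instance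

-- ===== CLAIM (what is proved, stated in full; the proofs are below) =====
def Claim_equal_count_block_moves : Prop := ∀ (board : List (List Int)) (player : Int), Dom_count_block_moves board player → Pre_count_block_moves board player → Spec_count_block_moves board player (count_block_moves board player)

-- ===== LEMMAS AND PROOFS =====

-- 0/1 indicator of a decidable proposition
def pvInd (p : Prop) [Decidable p] : Int := if p then 1 else 0

theorem pvInd_congr (p q : Prop) [Decidable p] [Decidable q] (h : p ↔ q) : pvInd p = pvInd q := by
  simp [pvInd, h]

theorem pvInd_of_not (p : Prop) [Decidable p] (h : ¬ p) : pvInd p = 0 := by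
  simp [pvInd, h]

theorem pvIte_add (p : Prop) [Decidable p] (x : Int) : (if p then x + 1 else x) = x + pvInd p := by
  by_cases h : p <;> simp [pvInd, h]



def pvRowP (pl r : Int) (vs : List Int) (t : Int) : List (Int × Int) :=
  (PySem.List.enumerate vs t).filterMap (fun cv => if cv.2 = pl then some (r, cv.1) else none)

theorem pv_rowP_cons (pl r t : Int) (v : Int) (vs : List Int) :
    pvRowP pl r (v :: vs) t = (if v = pl then [(r, t)] else []) ++ pvRowP pl r vs (t + 1) := by
  simp only [pvRowP, PySem.List.enumerate_cons, List.filterMap_cons]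
  split_ifs <;> simp

theorem pv_build_inner (pl r : Int) (vs : List Int) : ∀ (t : Int) (P Z : PySem.Set (Int × Int)),
    (∀ q ∈ P, q.1 ≠ r ∨ q.2 < t) → (∀ q ∈ Z, q.1 ≠ r ∨ q.2 < t) →
    (PySem.List.enumerate vs t).foldl (fun st cv => pvAddCell pl st r cv) (P, Z)
      = (P ++ pvRowP pl r vs t, Z ++ pvRowP 0 r vs t) := by
  induction vs with
  | nil => intro t P Z _ _; simp [PySem.List.enumerate_nil, pvRowP]
  | cons v vs ih =>
    intro t P Z hP hZ
    have hPn : (r, t) ∉ P := fun hm => by rcases hP _ hm with h | h <;> simp_all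
    have hZn : (r, t) ∉ Z := fun hm => by rcases hZ _ hm with h | h <;> simp_all
    rw [PySem.List.enumerate_cons, List.foldl_cons]
    have step : pvAddCell pl (P, Z) r (t, v)
        = (P ++ (if v = pl then [(r, t)] else []), Z ++ (if v = 0 then [(r, t)] else [])) := by
      simp only [pvAddCell]
      by_cases h2 : v = 0
      · subst h2
        by_cases h1 : (0 : Int) = pl
        · subst h1
          simp [PySem.Set.add_of_not_mem, hPn, hZn]
        · simp [h1, PySem.Set.add_of_not_mem, hZn]
      · by_cases h1 : v = pl
        · subst h1
          simp [h2, PySem.Set.add_of_not_mem, hPn]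
        · simp [h1, h2]
    rw [step]
    have hP' : ∀ q ∈ P ++ (if v = pl then [(r, t)] else []), q.1 ≠ r ∨ q.2 < t + 1 := by
      intro q hq
      rcases List.mem_append.mp hq with h | h
      · rcases hP _ h with h' | h'
        · exact Or.inl h'
        · exact Or.inr (by omega)
      · split_ifs at h
        · rcases List.mem_singleton.mp h with rfl; exact Or.inr (by omega)
        · simp at h
    have hZ' : ∀ q ∈ Z ++ (if v = 0 then [(r, t)] else []), q.1 ≠ r ∨ q.2 < t + 1 := by
      intro q hq
      rcases List.mem_append.mp hq with h | h
      · rcases hZ _ h with h' | h'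
        · exact Or.inl h'
        · exact Or.inr (by omega)
      · split_ifs at h
        · rcases List.mem_singleton.mp h with rfl; exact Or.inr (by omega)
        · simp at h
    rw [ih (t + 1) _ _ hP' hZ']
    rw [pv_rowP_cons, pv_rowP_cons]
    simp [List.append_assoc]

def pvGridP (pl : Int) (bs : List (List Int)) (w s : Int) : List (Int × Int) :=
  (PySem.List.enumerate bs s).flatMap (fun rr => pvRowP pl rr.1 (PySem.List.slice rr.2 none (some w)) 0)

theorem pv_mem_pvRowP (pl r : Int) (vs : List Int) (t : Int) (q : Int × Int) :
    q ∈ pvRowP pl r vs t ↔ ∃ (k : Nat) (_ : k < vs.length), q = (r, t + k) ∧ vs[k] = pl := by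
  simp only [pvRowP, List.mem_filterMap, PySem.List.mem_enumerate_iff]
  constructor
  · rintro ⟨cv, ⟨k, hk, rfl⟩, hF⟩
    split_ifs at hF with hv
    · simp only [Option.some.injEq] at hF
      exact ⟨k, hk, hF.symm, hv⟩
  · rintro ⟨k, hk, rfl, hv⟩
    exact ⟨(t + k, vs[k]), ⟨k, hk, rfl⟩, by simp [hv]⟩

theorem pv_gridP_cons (pl w s : Int) (row : List Int) (bs : List (List Int)) :
    pvGridP pl (row :: bs) w s
      = pvRowP pl s (PySem.List.slice row none (some w)) 0 ++ pvGridP pl bs w (s + 1) := by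
  simp [pvGridP, PySem.List.enumerate_cons]

theorem pv_build_outer (pl w : Int) (bs : List (List Int)) : ∀ (s : Int) (P Z : PySem.Set (Int × Int)),
    (∀ q ∈ P, q.1 < s) → (∀ q ∈ Z, q.1 < s) →
    (PySem.List.enumerate bs s).foldl (fun st rr =>
      (PySem.List.enumerate (PySem.List.slice rr.2 none (some w)) 0).foldl
        (fun st cv => pvAddCell pl st rr.1 cv) st) (P, Z)
      = (P ++ pvGridP pl bs w s, Z ++ pvGridP 0 bs w s) := by
  induction bs with
  | nil => intro s P Z _ _; simp [PySem.List.enumerate_nil, pvGridP]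
  | cons row bs ih =>
    intro s P Z hP hZ
    rw [PySem.List.enumerate_cons, List.foldl_cons]
    rw [pv_build_inner pl s (PySem.List.slice row none (some w)) 0 P Z
        (fun q hq => Or.inl (by have := hP q hq; omega))
        (fun q hq => Or.inl (by have := hZ q hq; omega))]
    rw [ih (s + 1) _ _
        (by
          intro q hq
          rcases List.mem_append.mp hq with h | h
          · have := hP q h; omega
          · rcases (pv_mem_pvRowP _ _ _ _ q).mp h with ⟨k, hk, rfl, _⟩; simp)
        (by
          intro q hq
          rcases List.mem_append.mp hq with h | h
          · have := hZ q h; omega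
          · rcases (pv_mem_pvRowP _ _ _ _ q).mp h with ⟨k, hk, rfl, _⟩; simp)]
    rw [pv_gridP_cons, pv_gridP_cons]
    simp [List.append_assoc]


theorem pv_buildSets_eq (board : List (List Int)) (pl w : Int) :
    pvBuildSets board pl w = (pvGridP pl board w 0, pvGridP 0 board w 0) := by
  unfold pvBuildSets
  rw [pv_build_outer pl w board 0 _ _ (by simp [PySem.Set.empty]) (by simp [PySem.Set.empty])]
  simp [PySem.Set.empty]

theorem pv_sum_flatMap {α β : Type} (l : List α) (f : α → List β) (g : β → Int) :
    ((l.flatMap f).map g).sum = (l.map (fun x => ((f x).map g).sum)).sum := by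
  induction l with
  | nil => rfl
  | cons x l ih => simp [List.flatMap_cons, ih]

theorem pv_sum_filterMap {α β : Type} (l : List α) (F : α → Option β) (g : β → Int) :
    ((l.filterMap F).map g).sum = (l.map (fun x => ((F x).map g).getD 0)).sum := by
  induction l with
  | nil => rfl
  | cons x l ih =>
    simp only [List.filterMap_cons, List.map_cons, List.sum_cons]
    cases hF : F x <;> simp [ih]

theorem pvSum_shift (a b t : Int) (g : Int → Int) :
    ((PySem.List.pyRange a b 1).map g).sum
      = ((PySem.List.pyRange (a + t) (b + t) 1).map (fun x => g (x - t))).sum := by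
  rw [PySem.List.pyRange_one, PySem.List.pyRange_one]
  have hb : (b + t - (a + t)) = (b - a) := by ring
  rw [hb]
  simp only [List.map_map]
  apply congrArg List.sum
  apply List.map_congr_left
  intro k _
  simp only [Function.comp_apply]
  congr 1
  ring

theorem pvSum_trim (m lo hi n : Int) (g : Int → Int) (hm : m ≤ lo) (hn : hi ≤ n)
    (hg : ∀ x, m ≤ x → x < n → x < lo ∨ hi ≤ x → g x = 0) :
    ((PySem.List.pyRange m n 1).map g).sum = ((PySem.List.pyRange lo hi 1).map g).sum := by
  by_cases hlh : lo ≤ hi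
  · rw [PySem.List.pyRange_one_append m lo n hm (by omega),
        PySem.List.pyRange_one_append lo hi n hlh hn]
    simp only [List.map_append, List.sum_append]
    have h1 : ((PySem.List.pyRange m lo 1).map g).sum = 0 := by
      apply List.sum_eq_zero
      intro x hx
      simp only [List.mem_map] at hx
      obtain ⟨y, hy, rfl⟩ := hx
      rw [PySem.List.mem_pyRange_one] at hy
      exact hg y hy.1 (by omega) (Or.inl hy.2)
    have h2 : ((PySem.List.pyRange hi n 1).map g).sum = 0 := by
      apply List.sum_eq_zero
      intro x hx
      simp only [List.mem_map] at hx
      obtain ⟨y, hy, rfl⟩ := hx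
      rw [PySem.List.mem_pyRange_one] at hy
      exact hg y (by omega) hy.2 (Or.inr hy.1)
    omega
  · rw [PySem.List.pyRange_one_eq_nil (show hi ≤ lo by omega)]
    simp only [List.map_nil, List.sum_nil]
    apply List.sum_eq_zero
    intro x hx
    simp only [List.mem_map] at hx
    obtain ⟨y, hy, rfl⟩ := hx
    rw [PySem.List.mem_pyRange_one] at hy
    exact hg y hy.1 hy.2 (by omega)


theorem pv_sum_rowP (pl r : Int) (vs : List Int) (g : Int × Int → Int) :
    ((pvRowP pl r vs 0).map g).sum
      = ((PySem.List.pyRange 0 (PySem.List.len vs) 1).map (fun c =>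
          if PySem.List.pyGetD vs c 0 = pl then g (r, c) else 0)).sum := by
  unfold pvRowP
  rw [pv_sum_filterMap, PySem.List.enumerate_eq_map_pyRange vs 0, List.map_map]
  apply congrArg List.sum
  apply List.map_congr_left
  intro j _
  simp only [Function.comp_apply]
  split_ifs <;> simp

theorem pv_sum_gridP (pl w : Int) (bs : List (List Int)) (g : Int × Int → Int) :
    ((pvGridP pl bs w 0).map g).sum
      = ((PySem.List.pyRange 0 (PySem.List.len bs) 1).map (fun r =>
          ((PySem.List.pyRange 0 (PySem.List.len (PySem.List.slice (PySem.List.pyGetD bs r []) none (some w))) 1).map (fun c =>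
            if PySem.List.pyGetD (PySem.List.slice (PySem.List.pyGetD bs r []) none (some w)) c 0 = pl
            then g (r, c) else 0)).sum)).sum := by
  unfold pvGridP
  rw [pv_sum_flatMap, PySem.List.enumerate_eq_map_pyRange bs [], List.map_map]
  apply congrArg List.sum
  apply List.map_congr_left
  intro r _
  simp only [Function.comp_apply]
  exact pv_sum_rowP pl r _ g

theorem pv_sum_gridP_pre (pl : Int) (bs : List (List Int)) (wN : Nat)
    (hw : ∀ row ∈ bs, wN ≤ row.length) (g : Int × Int → Int) :
    ((pvGridP pl bs (wN : Int) 0).map g).sum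
      = ((PySem.List.pyRange 0 (PySem.List.len bs) 1).map (fun r =>
          ((PySem.List.pyRange 0 (wN : Int) 1).map (fun c =>
            pvInd (pvCellA bs r c = pl) * g (r, c))).sum)).sum := by
  rw [pv_sum_gridP]
  apply congrArg List.sum
  apply List.map_congr_left
  intro r hr
  rw [PySem.List.mem_pyRange_one] at hr
  simp only [PySem.List.len_eq] at hr
  have hrn : r = ((r.toNat : Nat) : Int) := by omega
  have hrl : r.toNat < bs.length := by omega
  have hrow : PySem.List.pyGetD bs r [] = bs[r.toNat] := by
    have h0 := PySem.List.pyGetD_natCast bs r.toNat ([] : List Int)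
    rw [← hrn] at h0
    rw [h0]
    exact List.getD_eq_getElem bs [] hrl
  have hwle : wN ≤ bs[r.toNat].length := hw _ (List.getElem_mem hrl)
  rw [hrow, PySem.List.slice_to_natCast]
  have hlen : PySem.List.len (List.take wN bs[r.toNat]) = (wN : Int) := by
    simp [PySem.List.len_eq, List.length_take, Nat.min_eq_left hwle]
  rw [hlen]
  apply congrArg List.sum
  apply List.map_congr_left
  intro c hc
  rw [PySem.List.mem_pyRange_one] at hc
  have hcn : c = ((c.toNat : Nat) : Int) := by omega
  have hcl : c.toNat < wN := by omega
  have hcell : PySem.List.pyGetD (List.take wN bs[r.toNat]) c 0 = pvCellA bs r c := by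
    have h1 := PySem.List.pyGetD_natCast (List.take wN bs[r.toNat]) c.toNat (0 : Int)
    rw [← hcn] at h1
    have h2 := PySem.List.pyGetD_natCast bs[r.toNat] c.toNat (0 : Int)
    rw [← hcn] at h2
    rw [h1, pvCellA, hrow, h2]
    rw [List.getD_eq_getElem _ 0 (by simp [List.length_take]; omega),
        List.getD_eq_getElem _ 0 (by omega)]
    exact List.getElem_take
  rw [hcell]
  by_cases hpl : pvCellA bs r c = pl <;> simp [hpl, pvInd]

theorem pv_cellA_nat (bs : List (List Int)) (rk ck : Nat) (hr : rk < bs.length)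
    (hc : ck < bs[rk].length) : pvCellA bs (rk : Int) (ck : Int) = bs[rk][ck] := by
  rw [pvCellA, PySem.List.pyGetD_natCast bs rk [], List.getD_eq_getElem _ _ hr,
      PySem.List.pyGetD_natCast, List.getD_eq_getElem _ _ hc]

theorem pv_mem_gridP_iff (pl : Int) (bs : List (List Int)) (wN : Nat)
    (hw : ∀ row ∈ bs, wN ≤ row.length) (q : Int × Int) :
    q ∈ pvGridP pl bs (wN : Int) 0 ↔
      0 ≤ q.1 ∧ q.1 < bs.length ∧ 0 ≤ q.2 ∧ q.2 < wN ∧ pvCellA bs q.1 q.2 = pl := by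
  unfold pvGridP
  simp only [List.mem_flatMap, PySem.List.mem_enumerate_iff]
  constructor
  · rintro ⟨rr, ⟨k, hk, rfl⟩, hq⟩
    rw [pv_mem_pvRowP] at hq
    obtain ⟨c, hc, rfl, hcell⟩ := hq
    dsimp only at hc hcell ⊢
    simp only [PySem.List.slice_to_natCast] at hc hcell
    have hwk : wN ≤ bs[k].length := hw _ (List.getElem_mem hk)
    have hlt : (List.take wN bs[k]).length = wN := by
      rw [List.length_take]; omega
    have hc' : c < wN := by omega
    have hcv : bs[k][c]'(by omega) = pl := by
      rw [← hcell]; exact (List.getElem_take).symm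
    have hcell2 : pvCellA bs (0 + (k : Int)) (0 + (c : Int)) = pl := by
      rw [zero_add, zero_add, pv_cellA_nat bs k c hk (by omega)]
      exact hcv
    exact ⟨by omega, by omega, by omega, by omega, hcell2⟩
  · rintro ⟨h1, h2, h3, h4, h5⟩
    have hk : q.1.toNat < bs.length := by omega
    have hwk : wN ≤ bs[q.1.toNat].length := hw _ (List.getElem_mem hk)
    have hc : q.2.toNat < wN := by omega
    refine ⟨((q.1.toNat : Int), bs[q.1.toNat]), ⟨q.1.toNat, hk, by rw [zero_add]⟩, ?_⟩
    rw [pv_mem_pvRowP]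
    dsimp only
    rw [PySem.List.slice_to_natCast]
    have hlt : (List.take wN bs[q.1.toNat]).length = wN := by
      rw [List.length_take]; omega
    refine ⟨q.2.toNat, by omega, ?_, ?_⟩
    · have : q = (q.1, q.2) := rfl
      rw [this]
      congr 1 <;> omega
    · have hgt : (List.take wN bs[q.1.toNat])[q.2.toNat]'(by omega)
          = bs[q.1.toNat][q.2.toNat]'(by omega) := List.getElem_take
      rw [hgt, ← pv_cellA_nat bs q.1.toNat q.2.toNat hk (by omega)]
      have e1 : ((q.1.toNat : Nat) : Int) = q.1 := by omega
      have e2 : ((q.2.toNat : Nat) : Int) = q.2 := by omega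
      rw [e1, e2]
      exact h5

theorem pv_mem_gridP_bounds (pl : Int) (bs : List (List Int)) (wN : Nat) (q : Int × Int)
    (h : q ∈ pvGridP pl bs (wN : Int) 0) :
    0 ≤ q.1 ∧ q.1 < bs.length ∧ 0 ≤ q.2 ∧ q.2 < wN := by
  unfold pvGridP at h
  simp only [List.mem_flatMap, PySem.List.mem_enumerate_iff] at h
  obtain ⟨rr, ⟨k, hk, rfl⟩, hq⟩ := h
  rw [pv_mem_pvRowP] at hq
  obtain ⟨c, hc, rfl, -⟩ := hq
  dsimp only at hc ⊢
  rw [PySem.List.slice_to_natCast] at hc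
  have hlt : (List.take wN bs[k]).length ≤ wN := by
    rw [List.length_take]; omega
  exact ⟨by omega, by omega, by omega, by omega⟩

theorem pvSum2 (h w dr dc lo1 hi1 lo2 hi2 : Int) (F G : Int → Int → Int)
    (hFG : ∀ p q, F p q = G (p - dr) (q - dc))
    (hlo1 : -dr ≤ lo1) (hhi1 : hi1 ≤ h - dr) (hlo2 : -dc ≤ lo2) (hhi2 : hi2 ≤ w - dc)
    (hvan : ∀ r c, -dr ≤ r → r < h - dr → -dc ≤ c → c < w - dc →
        (r < lo1 ∨ hi1 ≤ r ∨ c < lo2 ∨ hi2 ≤ c) → G r c = 0) :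
    ((PySem.List.pyRange 0 h 1).map (fun p =>
        ((PySem.List.pyRange 0 w 1).map (fun q => F p q)).sum)).sum
      = ((PySem.List.pyRange lo1 hi1 1).map (fun r =>
          ((PySem.List.pyRange lo2 hi2 1).map (fun c => G r c)).sum)).sum := by
  have hsub : ∀ x t : Int, x - -t - t = x := by intro x t; ring
  calc
    ((PySem.List.pyRange 0 h 1).map (fun p =>
        ((PySem.List.pyRange 0 w 1).map (fun q => F p q)).sum)).sum
        = ((PySem.List.pyRange (-dr) (h - dr) 1).map (fun r =>
            ((PySem.List.pyRange 0 w 1).map (fun q => G r (q - dc))).sum)).sum := by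
          rw [pvSum_shift 0 h (-dr)]
          rw [show (0 + -dr : Int) = -dr by ring, show (h + -dr : Int) = h - dr by ring]
          apply congrArg List.sum
          apply List.map_congr_left
          intro p _
          apply congrArg List.sum
          apply List.map_congr_left
          intro q _
          rw [hFG, hsub]
    _ = ((PySem.List.pyRange lo1 hi1 1).map (fun r =>
            ((PySem.List.pyRange 0 w 1).map (fun q => G r (q - dc))).sum)).sum := by
          apply pvSum_trim (-dr) lo1 hi1 (h - dr) _ hlo1 hhi1
          intro r hr1 hr2 hout
          apply List.sum_eq_zero
          intro x hx
          simp only [List.mem_map] at hx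
          obtain ⟨q, hq, rfl⟩ := hx
          rw [PySem.List.mem_pyRange_one] at hq
          exact hvan r (q - dc) hr1 hr2 (by omega) (by omega) (by omega)
    _ = ((PySem.List.pyRange lo1 hi1 1).map (fun r =>
            ((PySem.List.pyRange lo2 hi2 1).map (fun c => G r c)).sum)).sum := by
          apply congrArg List.sum
          apply List.map_congr_left
          intro r hr
          rw [PySem.List.mem_pyRange_one] at hr
          calc
            ((PySem.List.pyRange 0 w 1).map (fun q => G r (q - dc))).sum
                = ((PySem.List.pyRange (-dc) (w - dc) 1).map (fun c => G r c)).sum := by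
                  rw [pvSum_shift 0 w (-dc)]
                  rw [show (0 + -dc : Int) = -dc by ring, show (w + -dc : Int) = w - dc by ring]
                  apply congrArg List.sum
                  apply List.map_congr_left
                  intro q _
                  rw [hsub]
            _ = ((PySem.List.pyRange lo2 hi2 1).map (fun c => G r c)).sum := by
                  apply pvSum_trim (-dc) lo2 hi2 (w - dc) _ hlo2 hhi2
                  intro c hc1 hc2 hout
                  exact hvan r c (by omega) (by omega) hc1 hc2 (by omega)

theorem pvInd_mul (x y : Prop) [Decidable x] [Decidable y] :
    pvInd x * pvInd y = pvInd (x ∧ y) := by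
  by_cases hx : x <;> by_cases hy : y <;> simp [pvInd, hx, hy]

theorem pv_dir1 (board : List (List Int)) (pl : Int) (wN : Nat)
    (hw : ∀ row ∈ board, wN ≤ row.length) :
    (List.map (fun x : Int × Int =>
        pvInd ((x.1 + 1, x.2 + 0) ∈ pvGridP pl board (wN : Int) 0 ∧
          (x.1 + 2 * 1, x.2 + 2 * 0) ∈ pvGridP pl board (wN : Int) 0 ∧
          (x.1 - 1, x.2 - 0) ∈ pvGridP 0 board (wN : Int) 0))
      (pvGridP pl board (wN : Int) 0)).sum
    = (List.map (fun r =>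
        (List.map (fun c =>
          pvInd (pvCellA board r c = 0 ∧ pvCellA board (r + 1) c = pl ∧
            pvCellA board (r + 2) c = pl ∧ pvCellA board (r + 3) c = pl))
          (PySem.List.pyRange 0 (wN : Int) 1)).sum)
        (PySem.List.pyRange 0 (PySem.List.len board - 3) 1)).sum := by
  have hmemP := pv_mem_gridP_iff pl board wN hw
  have hmemZ := pv_mem_gridP_iff 0 board wN hw
  rw [pv_sum_gridP_pre pl board wN hw]
  refine Eq.trans (pvSum2 (PySem.List.len board) (wN : Int) 1 0 0 (PySem.List.len board - 3) 0 (wN : Int)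
      _
      (fun r c => pvInd (0 ≤ r ∧ r + 3 < PySem.List.len board ∧ 0 ≤ c ∧ c < (wN : Int) ∧
        pvCellA board r c = 0 ∧ pvCellA board (r + 1) c = pl ∧
        pvCellA board (r + 2) c = pl ∧ pvCellA board (r + 3) c = pl))
      ?_ (by omega) (by omega) (by omega) (by omega) ?_) ?_
  · intro p q
    simp only [hmemP, hmemZ, pvInd_mul]
    apply pvInd_congr
    simp only [PySem.List.len_eq]
    ring_nf
    constructor
    · rintro ⟨h0, ⟨b1, b2, b3, b4, c1⟩, ⟨b5, b6, b7, b8, c2⟩, ⟨b9, b10, b11, b12, c3⟩⟩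
      refine ⟨by omega, by omega, by omega, by omega, ?_, ?_, ?_, ?_⟩ <;> assumption
    · rintro ⟨b1, b2, b3, b4, c0, c1, c2, c3⟩
      refine ⟨?_, ⟨by omega, by omega, by omega, by omega, ?_⟩,
        ⟨by omega, by omega, by omega, by omega, ?_⟩,
        ⟨by omega, by omega, by omega, by omega, ?_⟩⟩ <;> assumption
  · intro r c hr1 hr2 hc1 hc2 hout
    apply pvInd_of_not
    rintro ⟨b1, b2, b3, b4, -⟩
    simp only [PySem.List.len_eq] at b2 hr2 hr1 hout ⊢
    omega
  · apply congrArg List.sum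
    apply List.map_congr_left
    intro r hr
    rw [PySem.List.mem_pyRange_one] at hr
    apply congrArg List.sum
    apply List.map_congr_left
    intro c hc
    rw [PySem.List.mem_pyRange_one] at hc
    apply pvInd_congr
    constructor
    · rintro ⟨-, -, -, -, c0, c1, c2, c3⟩
      exact ⟨c0, c1, c2, c3⟩
    · rintro ⟨c0, c1, c2, c3⟩
      simp only [PySem.List.len_eq] at hr ⊢
      exact ⟨by omega, by omega, by omega, by omega, c0, c1, c2, c3⟩

theorem pv_dir2 (board : List (List Int)) (pl : Int) (wN : Nat)
    (hw : ∀ row ∈ board, wN ≤ row.length) :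
    (List.map (fun x : Int × Int =>
        pvInd ((x.1 + 0, x.2 + 1) ∈ pvGridP pl board (wN : Int) 0 ∧
          (x.1 + 2 * 0, x.2 + 2 * 1) ∈ pvGridP pl board (wN : Int) 0 ∧
          (x.1 - 0, x.2 - 1) ∈ pvGridP 0 board (wN : Int) 0))
      (pvGridP pl board (wN : Int) 0)).sum
    = (List.map (fun r =>
        (List.map (fun c =>
          pvInd (pvCellA board r c = 0 ∧ pvCellA board r (c + 1) = pl ∧
            pvCellA board r (c + 2) = pl ∧ pvCellA board r (c + 3) = pl))
          (PySem.List.pyRange 0 ((wN : Int) - 3) 1)).sum)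
        (PySem.List.pyRange 0 (PySem.List.len board) 1)).sum := by
  have hmemP := pv_mem_gridP_iff pl board wN hw
  have hmemZ := pv_mem_gridP_iff 0 board wN hw
  rw [pv_sum_gridP_pre pl board wN hw]
  refine Eq.trans (pvSum2 (PySem.List.len board) (wN : Int) 0 1 0 (PySem.List.len board) 0 ((wN : Int) - 3)
      _
      (fun r c => pvInd (0 ≤ r ∧ r < PySem.List.len board ∧ 0 ≤ c ∧ c + 3 < (wN : Int) ∧
        pvCellA board r c = 0 ∧ pvCellA board r (c + 1) = pl ∧
        pvCellA board r (c + 2) = pl ∧ pvCellA board r (c + 3) = pl))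
      ?_ (by omega) (by omega) (by omega) (by omega) ?_) ?_
  · intro p q
    simp only [hmemP, hmemZ, pvInd_mul]
    apply pvInd_congr
    simp only [PySem.List.len_eq]
    ring_nf
    constructor
    · rintro ⟨h0, ⟨b1, b2, b3, b4, c1⟩, ⟨b5, b6, b7, b8, c2⟩, ⟨b9, b10, b11, b12, c3⟩⟩
      refine ⟨by omega, by omega, by omega, by omega, ?_, ?_, ?_, ?_⟩ <;> assumption
    · rintro ⟨b1, b2, b3, b4, c0, c1, c2, c3⟩
      refine ⟨?_, ⟨by omega, by omega, by omega, by omega, ?_⟩,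
        ⟨by omega, by omega, by omega, by omega, ?_⟩,
        ⟨by omega, by omega, by omega, by omega, ?_⟩⟩ <;> assumption
  · intro r c hr1 hr2 hc1 hc2 hout
    apply pvInd_of_not
    rintro ⟨b1, b2, b3, b4, -⟩
    simp only [PySem.List.len_eq] at b2 hr2 hr1 hout ⊢
    omega
  · apply congrArg List.sum
    apply List.map_congr_left
    intro r hr
    rw [PySem.List.mem_pyRange_one] at hr
    apply congrArg List.sum
    apply List.map_congr_left
    intro c hc
    rw [PySem.List.mem_pyRange_one] at hc
    apply pvInd_congr
    constructor
    · rintro ⟨-, -, -, -, c0, c1, c2, c3⟩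
      exact ⟨c0, c1, c2, c3⟩
    · rintro ⟨c0, c1, c2, c3⟩
      simp only [PySem.List.len_eq] at hr ⊢
      exact ⟨by omega, by omega, by omega, by omega, c0, c1, c2, c3⟩

theorem pv_dir3 (board : List (List Int)) (pl : Int) (wN : Nat)
    (hw : ∀ row ∈ board, wN ≤ row.length) :
    (List.map (fun x : Int × Int =>
        pvInd ((x.1 + 1, x.2 + 1) ∈ pvGridP pl board (wN : Int) 0 ∧
          (x.1 + 2 * 1, x.2 + 2 * 1) ∈ pvGridP pl board (wN : Int) 0 ∧
          (x.1 - 1, x.2 - 1) ∈ pvGridP 0 board (wN : Int) 0))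
      (pvGridP pl board (wN : Int) 0)).sum
    = (List.map (fun r =>
        (List.map (fun c =>
          pvInd (pvCellA board r c = 0 ∧ pvCellA board (r + 1) (c + 1) = pl ∧
            pvCellA board (r + 2) (c + 2) = pl ∧ pvCellA board (r + 3) (c + 3) = pl))
          (PySem.List.pyRange 0 ((wN : Int) - 3) 1)).sum)
        (PySem.List.pyRange 0 (PySem.List.len board - 3) 1)).sum := by
  have hmemP := pv_mem_gridP_iff pl board wN hw
  have hmemZ := pv_mem_gridP_iff 0 board wN hw
  rw [pv_sum_gridP_pre pl board wN hw]
  refine Eq.trans (pvSum2 (PySem.List.len board) (wN : Int) 1 1 0 (PySem.List.len board - 3) 0 ((wN : Int) - 3)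
      _
      (fun r c => pvInd (0 ≤ r ∧ r + 3 < PySem.List.len board ∧ 0 ≤ c ∧ c + 3 < (wN : Int) ∧
        pvCellA board r c = 0 ∧ pvCellA board (r + 1) (c + 1) = pl ∧
        pvCellA board (r + 2) (c + 2) = pl ∧ pvCellA board (r + 3) (c + 3) = pl))
      ?_ (by omega) (by omega) (by omega) (by omega) ?_) ?_
  · intro p q
    simp only [hmemP, hmemZ, pvInd_mul]
    apply pvInd_congr
    simp only [PySem.List.len_eq]
    ring_nf
    constructor
    · rintro ⟨h0, ⟨b1, b2, b3, b4, c1⟩, ⟨b5, b6, b7, b8, c2⟩, ⟨b9, b10, b11, b12, c3⟩⟩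
      refine ⟨by omega, by omega, by omega, by omega, ?_, ?_, ?_, ?_⟩ <;> assumption
    · rintro ⟨b1, b2, b3, b4, c0, c1, c2, c3⟩
      refine ⟨?_, ⟨by omega, by omega, by omega, by omega, ?_⟩,
        ⟨by omega, by omega, by omega, by omega, ?_⟩,
        ⟨by omega, by omega, by omega, by omega, ?_⟩⟩ <;> assumption
  · intro r c hr1 hr2 hc1 hc2 hout
    apply pvInd_of_not
    rintro ⟨b1, b2, b3, b4, -⟩
    simp only [PySem.List.len_eq] at b2 hr2 hr1 hout ⊢
    omega
  · apply congrArg List.sum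
    apply List.map_congr_left
    intro r hr
    rw [PySem.List.mem_pyRange_one] at hr
    apply congrArg List.sum
    apply List.map_congr_left
    intro c hc
    rw [PySem.List.mem_pyRange_one] at hc
    apply pvInd_congr
    constructor
    · rintro ⟨-, -, -, -, c0, c1, c2, c3⟩
      exact ⟨c0, c1, c2, c3⟩
    · rintro ⟨c0, c1, c2, c3⟩
      simp only [PySem.List.len_eq] at hr ⊢
      exact ⟨by omega, by omega, by omega, by omega, c0, c1, c2, c3⟩

theorem pv_dir4 (board : List (List Int)) (pl : Int) (wN : Nat)
    (hw : ∀ row ∈ board, wN ≤ row.length) :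
    (List.map (fun x : Int × Int =>
        pvInd ((x.1 + 1, x.2 + -1) ∈ pvGridP pl board (wN : Int) 0 ∧
          (x.1 + 2 * 1, x.2 + 2 * -1) ∈ pvGridP pl board (wN : Int) 0 ∧
          (x.1 - 1, x.2 - -1) ∈ pvGridP 0 board (wN : Int) 0))
      (pvGridP pl board (wN : Int) 0)).sum
    = (List.map (fun r =>
        (List.map (fun c =>
          pvInd (pvCellA board r c = 0 ∧ pvCellA board (r + 1) (c - 1) = pl ∧
            pvCellA board (r + 2) (c - 2) = pl ∧ pvCellA board (r + 3) (c - 3) = pl))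
          (PySem.List.pyRange 3 (wN : Int) 1)).sum)
        (PySem.List.pyRange 0 (PySem.List.len board - 3) 1)).sum := by
  have hmemP := pv_mem_gridP_iff pl board wN hw
  have hmemZ := pv_mem_gridP_iff 0 board wN hw
  rw [pv_sum_gridP_pre pl board wN hw]
  refine Eq.trans (pvSum2 (PySem.List.len board) (wN : Int) 1 (-1) 0 (PySem.List.len board - 3) 3 (wN : Int)
      _
      (fun r c => pvInd (0 ≤ r ∧ r + 3 < PySem.List.len board ∧ 0 ≤ c - 3 ∧ c < (wN : Int) ∧
        pvCellA board r c = 0 ∧ pvCellA board (r + 1) (c - 1) = pl ∧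
        pvCellA board (r + 2) (c - 2) = pl ∧ pvCellA board (r + 3) (c - 3) = pl))
      ?_ (by omega) (by omega) (by omega) (by omega) ?_) ?_
  · intro p q
    simp only [hmemP, hmemZ, pvInd_mul]
    apply pvInd_congr
    simp only [PySem.List.len_eq]
    ring_nf
    constructor
    · rintro ⟨h0, ⟨b1, b2, b3, b4, c1⟩, ⟨b5, b6, b7, b8, c2⟩, ⟨b9, b10, b11, b12, c3⟩⟩
      refine ⟨by omega, by omega, by omega, by omega, ?_, ?_, ?_, ?_⟩ <;> assumption
    · rintro ⟨b1, b2, b3, b4, c0, c1, c2, c3⟩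
      refine ⟨?_, ⟨by omega, by omega, by omega, by omega, ?_⟩,
        ⟨by omega, by omega, by omega, by omega, ?_⟩,
        ⟨by omega, by omega, by omega, by omega, ?_⟩⟩ <;> assumption
  · intro r c hr1 hr2 hc1 hc2 hout
    apply pvInd_of_not
    rintro ⟨b1, b2, b3, b4, -⟩
    simp only [PySem.List.len_eq] at b2 hr2 hr1 hout ⊢
    omega
  · apply congrArg List.sum
    apply List.map_congr_left
    intro r hr
    rw [PySem.List.mem_pyRange_one] at hr
    apply congrArg List.sum
    apply List.map_congr_left
    intro c hc
    rw [PySem.List.mem_pyRange_one] at hc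
    apply pvInd_congr
    constructor
    · rintro ⟨-, -, -, -, c0, c1, c2, c3⟩
      exact ⟨c0, c1, c2, c3⟩
    · rintro ⟨c0, c1, c2, c3⟩
      simp only [PySem.List.len_eq] at hr ⊢
      exact ⟨by omega, by omega, by omega, by omega, c0, c1, c2, c3⟩

theorem pvAB (board : List (List Int)) (player : Int)
    (hpre : Pre_count_block_moves board player) :
    count_block_moves board player = count_block_moves_alt board player := by
  have hA0 : PySem.List.pyGetD board 0 [] = board.headD [] := by
    cases board <;> simp [PySem.List.pyGetD, PySem.List.pyGet?, PySem.List.pyIdx?]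
  have hW : pvW board = ((board.headD []).length : Int) := by
    cases board <;> simp [pvW, PySem.List.len_eq]
  simp only [count_block_moves, count_block_moves_alt, pv_buildSets_eq, pvDirs,
    List.foldl_cons, List.foldl_nil, pvIte_add, add_assoc, PySem.List.foldl_add,
    zero_add, PySem.List.sum_map_add_int, hA0, hW, PySem.List.len_eq]
  rcases hpre with hw | hsmall
  · have e1 := pv_dir1 board player (board.headD []).length hw
    have e2 := pv_dir2 board player (board.headD []).length hw
    have e3 := pv_dir3 board player (board.headD []).length hw
    have e4 := pv_dir4 board player (board.headD []).length hw
    simp only [PySem.List.len_eq] at e1 e2 e3 e4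
    rw [e1, e2, e3, e4]
  · obtain ⟨hsh, hsw⟩ := hsmall
    have hr3 : PySem.List.pyRange 0 ((board.length : Int) - 3) 1 = [] :=
      PySem.List.pyRange_one_eq_nil (by omega)
    have hc3 : PySem.List.pyRange 0 (((board.headD []).length : Int) - 3) 1 = [] :=
      PySem.List.pyRange_one_eq_nil (by omega)
    have hb1 : (List.map
          (fun x : Int × Int =>
            pvInd
              ((x.1 + 1, x.2 + 0) ∈ pvGridP player board (((board.headD []).length : Nat) : Int) 0 ∧
                (x.1 + 2 * 1, x.2 + 2 * 0) ∈ pvGridP player board (((board.headD []).length : Nat) : Int) 0 ∧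
                  (x.1 - 1, x.2 - 0) ∈ pvGridP 0 board (((board.headD []).length : Nat) : Int) 0))
          (pvGridP player board (((board.headD []).length : Nat) : Int) 0)).sum = 0 := by
      apply List.sum_eq_zero
      intro x hx
      simp only [List.mem_map] at hx
      obtain ⟨p, hp, rfl⟩ := hx
      apply pvInd_of_not
      rintro ⟨m1, m2, m3⟩
      have b2 := pv_mem_gridP_bounds _ board _ _ m2
      have b3 := pv_mem_gridP_bounds _ board _ _ m3
      simp only at b2 b3
      omega
    have hb2 : (List.map
          (fun x : Int × Int =>
            pvInd
              ((x.1 + 0, x.2 + 1) ∈ pvGridP player board (((board.headD []).length : Nat) : Int) 0 ∧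
                (x.1 + 2 * 0, x.2 + 2 * 1) ∈ pvGridP player board (((board.headD []).length : Nat) : Int) 0 ∧
                  (x.1 - 0, x.2 - 1) ∈ pvGridP 0 board (((board.headD []).length : Nat) : Int) 0))
          (pvGridP player board (((board.headD []).length : Nat) : Int) 0)).sum = 0 := by
      apply List.sum_eq_zero
      intro x hx
      simp only [List.mem_map] at hx
      obtain ⟨p, hp, rfl⟩ := hx
      apply pvInd_of_not
      rintro ⟨m1, m2, m3⟩
      have b2 := pv_mem_gridP_bounds _ board _ _ m2
      have b3 := pv_mem_gridP_bounds _ board _ _ m3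
      simp only at b2 b3
      omega
    have hb3 : (List.map
          (fun x : Int × Int =>
            pvInd
              ((x.1 + 1, x.2 + 1) ∈ pvGridP player board (((board.headD []).length : Nat) : Int) 0 ∧
                (x.1 + 2 * 1, x.2 + 2 * 1) ∈ pvGridP player board (((board.headD []).length : Nat) : Int) 0 ∧
                  (x.1 - 1, x.2 - 1) ∈ pvGridP 0 board (((board.headD []).length : Nat) : Int) 0))
          (pvGridP player board (((board.headD []).length : Nat) : Int) 0)).sum = 0 := by
      apply List.sum_eq_zero
      intro x hx
      simp only [List.mem_map] at hx
      obtain ⟨p, hp, rfl⟩ := hx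
      apply pvInd_of_not
      rintro ⟨m1, m2, m3⟩
      have b2 := pv_mem_gridP_bounds _ board _ _ m2
      have b3 := pv_mem_gridP_bounds _ board _ _ m3
      simp only at b2 b3
      omega
    have hb4 : (List.map
          (fun x : Int × Int =>
            pvInd
              ((x.1 + 1, x.2 + -1) ∈ pvGridP player board (((board.headD []).length : Nat) : Int) 0 ∧
                (x.1 + 2 * 1, x.2 + 2 * -1) ∈ pvGridP player board (((board.headD []).length : Nat) : Int) 0 ∧
                  (x.1 - 1, x.2 - -1) ∈ pvGridP 0 board (((board.headD []).length : Nat) : Int) 0))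
          (pvGridP player board (((board.headD []).length : Nat) : Int) 0)).sum = 0 := by
      apply List.sum_eq_zero
      intro x hx
      simp only [List.mem_map] at hx
      obtain ⟨p, hp, rfl⟩ := hx
      apply pvInd_of_not
      rintro ⟨m1, m2, m3⟩
      have b2 := pv_mem_gridP_bounds _ board _ _ m2
      have b3 := pv_mem_gridP_bounds _ board _ _ m3
      simp only at b2 b3
      omega
    rw [hb1, hb2, hb3, hb4, hr3, hc3]
    simp

-- ===== VERDICT (by name: the statement is the Claim_ definition above) =====
theorem count_block_moves_spec : Claim_equal_count_block_moves := by
  intro board player _ hpre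
  unfold Spec_count_block_moves
  exact pvAB board player hpre
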